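-- pv_equiv track=rewrite | github.com/alazarteka/kaist-cli | src/kaist_cli/cli/output.py | _dataset_kind
-- ===== SOURCE A (Python) =====
-- from typing import Any
--
-- def _dataset_kind(rows: list[dict[str, Any]]) -> str:
--     keys = {key for row in rows for key in row.keys()}
--     if "due_iso" in keys:
--         return "assignments"
--     if "posted_iso" in keys:
--         return "notices"
--     if "viewer_url" in keys or "stream_url" in keys:
--         return "videos"
--     if "downloadable" in keys or "download_url" in keys:
--         return "files"
--     if "term_label" in keys:
--         return "courses"
--     if "kind" in keys and "time_iso" in keys:
--         return "inbox"
--     return "generic"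
-- ===== SOURCE B (Python) =====
-- from typing import Any
--
-- _RANK = {
--     "due_iso": 0,
--     "posted_iso": 1,
--     "viewer_url": 2,
--     "stream_url": 2,
--     "downloadable": 3,
--     "download_url": 3,
--     "term_label": 4,
-- }
-- _LABEL = ["assignments", "notices", "videos", "files", "courses"]
--
-- def _dataset_kind(rows: list[dict[str, Any]]) -> str:
--     best = 5
--     has_kind = False
--     has_time = False
--     for row in rows:
--         for key in row:
--             r = _RANK.get(key)
--             if r is not None and r < best:
--                 best = r
--             if key == "kind":
--                 has_kind = True
--             elif key == "time_iso":
--                 has_time = True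
--     if best < 5:
--         return _LABEL[best]
--     return "inbox" if has_kind and has_time else "generic"
-- ===== Notes on version B (the rewrite author's own statement) =====
-- stated objective: alternative
-- what changed: B replaces A's unified key-set plus priority branch cascade with a single fold over all row keys that tracks the minimum priority rank seen (and kind/time flags), then returns the label by table lookup on that rank.
import Mathlib
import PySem

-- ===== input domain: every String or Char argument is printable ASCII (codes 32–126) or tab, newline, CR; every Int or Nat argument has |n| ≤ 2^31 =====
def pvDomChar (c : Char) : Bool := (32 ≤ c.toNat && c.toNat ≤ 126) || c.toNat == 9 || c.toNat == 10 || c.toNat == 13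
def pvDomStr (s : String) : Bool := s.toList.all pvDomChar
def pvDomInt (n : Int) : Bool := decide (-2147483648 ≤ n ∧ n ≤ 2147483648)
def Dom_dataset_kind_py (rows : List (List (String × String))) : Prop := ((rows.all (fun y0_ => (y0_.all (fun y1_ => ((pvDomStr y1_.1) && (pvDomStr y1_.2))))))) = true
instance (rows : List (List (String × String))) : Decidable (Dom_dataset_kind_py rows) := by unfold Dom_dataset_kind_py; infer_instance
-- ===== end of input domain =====

-- B replaces A's key-set build plus branch cascade by one fold over the rows that tracks the
-- minimum priority rank seen (plus kind/time flags) and finishes with a table lookup (alternative decomposition).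

-- ===== PORT A =====
def dataset_kind_py (rows : List (List (String × String))) : String :=
  let keys : PySem.Set String :=
    PySem.Set.ofList (rows.flatMap (fun row => (PySem.Dict.mk row).keys))
  if PySem.Set.contains keys "due_iso" then "assignments"
  else if PySem.Set.contains keys "posted_iso" then "notices"
  else if PySem.Set.contains keys "viewer_url" || PySem.Set.contains keys "stream_url" then "videos"
  else if PySem.Set.contains keys "downloadable" || PySem.Set.contains keys "download_url" then "files"
  else if PySem.Set.contains keys "term_label" then "courses"
  else if PySem.Set.contains keys "kind" && PySem.Set.contains keys "time_iso" then "inbox"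
  else "generic"

-- ===== PORT B =====
-- module-level _RANK dict and _LABEL table from Source B
def dk_rank : PySem.Dict String Int :=
  PySem.Dict.mk [("due_iso", 0), ("posted_iso", 1), ("viewer_url", 2), ("stream_url", 2),
                 ("downloadable", 3), ("download_url", 3), ("term_label", 4)]

def dk_label : List String := ["assignments", "notices", "videos", "files", "courses"]

-- loop body for one key: r = _RANK.get(key); if r is not None and r < best: best = r; kind/time flags
def dk_step (s : Int × Bool × Bool) (key : String) : Int × Bool × Bool :=
  let best := match PySem.Dict.get? dk_rank key with
    | some r => if r < s.1 then r else s.1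
    | none => s.1
  let kt := if key == "kind" then (true, s.2.2)
            else if key == "time_iso" then (s.2.1, true)
            else s.2
  (best, kt)

def dataset_kind_py_alt (rows : List (List (String × String))) : String :=
  let s := rows.foldl (fun s row => ((PySem.Dict.mk row).keys).foldl dk_step s) (5, false, false)
  if s.1 < 5 then (PySem.List.pyGet? dk_label s.1).getD ""  -- _LABEL[best]; always in range: 0 ≤ best < 5 here
  else if s.2.1 && s.2.2 then "inbox" else "generic"

-- ===== PRECONDITION & SPEC =====
def Spec_dataset_kind_py (rows : List (List (String × String))) (out : String) : Prop := out = dataset_kind_py_alt rows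
instance (rows : List (List (String × String))) (out : String) : Decidable (Spec_dataset_kind_py rows out) := by unfold Spec_dataset_kind_py; infer_instance

-- ===== CLAIM (what is proved, stated in full; the proofs are below) =====
def Claim_equal_dataset_kind_py : Prop := ∀ (rows : List (List (String × String))), Dom_dataset_kind_py rows → Spec_dataset_kind_py rows (dataset_kind_py rows)

-- ===== LEMMAS AND PROOFS =====

theorem dk_fold_flatMap (rows : List (List (String × String))) (s : Int × Bool × Bool) :
    rows.foldl (fun s row => ((PySem.Dict.mk row).keys).foldl dk_step s) s
      = (rows.flatMap (fun row => (PySem.Dict.mk row).keys)).foldl dk_step s := by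
  induction rows generalizing s with
  | nil => rfl
  | cons r rs ih =>
    rw [List.foldl_cons, List.flatMap_cons, List.foldl_append]
    exact ih _

-- the rank of a single key, as a total function (5 = no rank)
def dk_rankD (k : String) : Int := (PySem.Dict.get? dk_rank k).getD 5

theorem dk_step_best (s : Int × Bool × Bool) (k : String) (h5 : s.1 ≤ 5) :
    (dk_step s k).1 = min s.1 (dk_rankD k) := by
  unfold dk_step dk_rankD
  cases hg : PySem.Dict.get? dk_rank k
  · simp only [Option.getD_none]; omega
  · simp only [Option.getD_some]; split <;> omega

theorem dk_step_kind (s : Int × Bool × Bool) (k : String) :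
    (dk_step s k).2.1 = (s.2.1 || (k == "kind")) := by
  unfold dk_step
  by_cases h1 : k = "kind" <;> by_cases h2 : k = "time_iso" <;> simp [h1, h2]

theorem dk_step_time (s : Int × Bool × Bool) (k : String) :
    (dk_step s k).2.2 = (s.2.2 || (k == "time_iso")) := by
  unfold dk_step
  by_cases h1 : k = "kind" <;> by_cases h2 : k = "time_iso" <;> simp [h1, h2]

theorem dk_fold_kind (ks : List String) (s : Int × Bool × Bool) :
    (ks.foldl dk_step s).2.1 = (s.2.1 || ks.any (· == "kind")) := by
  induction ks generalizing s with
  | nil => simp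
  | cons k ks ih => simp [ih, dk_step_kind, Bool.or_assoc]

theorem dk_fold_time (ks : List String) (s : Int × Bool × Bool) :
    (ks.foldl dk_step s).2.2 = (s.2.2 || ks.any (· == "time_iso")) := by
  induction ks generalizing s with
  | nil => simp
  | cons k ks ih => simp [ih, dk_step_time, Bool.or_assoc]

-- closed form of _RANK.get(key) (5 = absent)
theorem dk_rankD_eq (k : String) :
    dk_rankD k =
      if k = "due_iso" then 0 else if k = "posted_iso" then 1 else if k = "viewer_url" then 2
      else if k = "stream_url" then 2 else if k = "downloadable" then 3 else if k = "download_url" then 3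
      else if k = "term_label" then 4 else 5 := by
  unfold dk_rankD dk_rank
  split_ifs with h1 h2 h3 h4 h5 h6 h7 <;> subst_vars <;> try rfl
  simp only [PySem.Dict.get?]
  rw [List.find?_eq_none.mpr]
  · rfl
  · intro p hp
    simp only [List.mem_cons, List.not_mem_nil] at hp
    rcases hp with rfl|rfl|rfl|rfl|rfl|rfl|rfl|h <;> simp only [beq_iff_eq] <;>
      (try rintro rfl) <;> simp_all

theorem dk_rankD_bounds (k : String) : 0 ≤ dk_rankD k ∧ dk_rankD k ≤ 5 := by
  rw [dk_rankD_eq]; split_ifs <;> norm_num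

theorem dk_fold_best_le (ks : List String) (s : Int × Bool × Bool) (h5 : s.1 ≤ 5) (n : Int) :
    ((ks.foldl dk_step s).1 ≤ n ↔ (s.1 ≤ n ∨ ∃ k ∈ ks, dk_rankD k ≤ n)) := by
  induction ks generalizing s with
  | nil => simp
  | cons k ks ih =>
    have hb := dk_step_best s k h5
    have hk := (dk_rankD_bounds k).2
    rw [List.foldl_cons, ih _ (by omega), hb]
    simp only [List.mem_cons]
    constructor
    · rintro (h | h)
      · by_cases h' : s.1 ≤ n
        · exact Or.inl h'
        · exact Or.inr ⟨k, Or.inl rfl, by omega⟩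
      · rcases h with ⟨k', hk', hr⟩; exact Or.inr ⟨k', Or.inr hk', hr⟩
    · rintro (h | ⟨k', hk', hr⟩)
      · exact Or.inl (by omega)
      · rcases hk' with rfl | hk'
        · exact Or.inl (by omega)
        · exact Or.inr ⟨k', hk', hr⟩

theorem dk_fold_best_ge (ks : List String) (s : Int × Bool × Bool) (h0 : 0 ≤ s.1) :
    0 ≤ (ks.foldl dk_step s).1 := by
  induction ks generalizing s with
  | nil => exact h0
  | cons k ks ih =>
    rw [List.foldl_cons]
    apply ih
    unfold dk_step
    cases hg : PySem.Dict.get? dk_rank k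
    · simpa using h0
    · have := (dk_rankD_bounds k).1
      unfold dk_rankD at this
      rw [hg] at this
      simp at this ⊢
      split <;> omega

-- which keys have each rank ≤ n  (dk_rank is a 7-entry literal dict)
theorem dk_rankD_le_iff (k : String) :
    (dk_rankD k ≤ 0 ↔ k = "due_iso") ∧
    (dk_rankD k ≤ 1 ↔ k = "due_iso" ∨ k = "posted_iso") ∧
    (dk_rankD k ≤ 2 ↔ k = "due_iso" ∨ k = "posted_iso" ∨ k = "viewer_url" ∨ k = "stream_url") ∧
    (dk_rankD k ≤ 3 ↔ k = "due_iso" ∨ k = "posted_iso" ∨ k = "viewer_url" ∨ k = "stream_url" ∨ k = "downloadable" ∨ k = "download_url") ∧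
    (dk_rankD k ≤ 4 ↔ k = "due_iso" ∨ k = "posted_iso" ∨ k = "viewer_url" ∨ k = "stream_url" ∨ k = "downloadable" ∨ k = "download_url" ∨ k = "term_label") := by
  rw [dk_rankD_eq]; split_ifs <;> simp_all

-- A's key-set membership as list membership
theorem dk_contains_iff (l : List String) (x : String) :
    (PySem.Set.contains (PySem.Set.ofList l) x = true) ↔ x ∈ l := by
  simp [pysem]

-- ===== VERDICT (by name: the statement is the Claim_ definition above) =====
theorem dataset_kind_py_spec : Claim_equal_dataset_kind_py := by
  intro rows _
  unfold Spec_dataset_kind_py dataset_kind_py dataset_kind_py_alt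
  rw [dk_fold_flatMap]
  set ks := rows.flatMap (fun row => (PySem.Dict.mk row).keys) with hks
  set s := ks.foldl dk_step ((5 : Int), false, false) with hs
  have h0 : 0 ≤ s.1 := dk_fold_best_ge ks _ (by norm_num)
  have hle : ∀ n : Int, (s.1 ≤ n ↔ (5 : Int) ≤ n ∨ ∃ k ∈ ks, dk_rankD k ≤ n) := fun n =>
    dk_fold_best_le ks _ (by norm_num) n
  have hmem := dk_contains_iff ks
  by_cases hd : "due_iso" ∈ ks
  · have cD : PySem.Set.contains (PySem.Set.ofList ks) "due_iso" = true := (hmem _).mpr hd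
    have hs1 : s.1 = 0 :=
      le_antisymm ((hle 0).mpr (Or.inr ⟨_, hd, by decide⟩)) h0
    simp only [cD, if_true, hs1]
    rw [if_pos (by norm_num : (0 : Int) < 5)]
    decide
  · have cD : PySem.Set.contains (PySem.Set.ofList ks) "due_iso" = false := by
      rw [Bool.eq_false_iff, Ne, hmem]; exact hd
    by_cases hp : "posted_iso" ∈ ks
    · have cP : PySem.Set.contains (PySem.Set.ofList ks) "posted_iso" = true := (hmem _).mpr hp
      have hup : s.1 ≤ 1 := (hle 1).mpr (Or.inr ⟨_, hp, by decide⟩)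
      have hlo : ¬ s.1 ≤ 0 := by
        rw [hle]
        rintro (h5 | ⟨k, hk, hr⟩)
        · omega
        · exact hd ((dk_rankD_le_iff k).1.mp hr ▸ hk)
      have hs1 : s.1 = 1 := by omega
      simp only [cD, cP, if_false, if_true, Bool.false_eq_true, hs1]
      rw [if_pos (by norm_num : (1 : Int) < 5)]
      decide
    · have cP : PySem.Set.contains (PySem.Set.ofList ks) "posted_iso" = false := by
        rw [Bool.eq_false_iff, Ne, hmem]; exact hp
      have hlo1 : ¬ s.1 ≤ 1 := by
        rw [hle]
        rintro (h5 | ⟨k, hk, hr⟩)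
        · omega
        · rcases (dk_rankD_le_iff k).2.1.mp hr with rfl | rfl
          · exact hd hk
          · exact hp hk
      by_cases hv : "viewer_url" ∈ ks ∨ "stream_url" ∈ ks
      · have cVS : (PySem.Set.contains (PySem.Set.ofList ks) "viewer_url"
            || PySem.Set.contains (PySem.Set.ofList ks) "stream_url") = true := by
          rw [Bool.or_eq_true, hmem, hmem]; exact hv
        have hup : s.1 ≤ 2 := by
          rcases hv with h | h
          · exact (hle 2).mpr (Or.inr ⟨_, h, by decide⟩)
          · exact (hle 2).mpr (Or.inr ⟨_, h, by decide⟩)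
        have hs1 : s.1 = 2 := by omega
        simp only [cD, cP, cVS, if_false, if_true, Bool.false_eq_true, hs1]
        rw [if_pos (by norm_num : (2 : Int) < 5)]
        decide
      · have cVS : (PySem.Set.contains (PySem.Set.ofList ks) "viewer_url"
            || PySem.Set.contains (PySem.Set.ofList ks) "stream_url") = false := by
          rw [Bool.eq_false_iff, Ne, Bool.or_eq_true, hmem, hmem]; exact hv
        have hlo2 : ¬ s.1 ≤ 2 := by
          rw [hle]
          rintro (h5 | ⟨k, hk, hr⟩)
          · omega
          · rcases (dk_rankD_le_iff k).2.2.1.mp hr with rfl | rfl | rfl | rfl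
            · exact hd hk
            · exact hp hk
            · exact hv (Or.inl hk)
            · exact hv (Or.inr hk)
        by_cases hf : "downloadable" ∈ ks ∨ "download_url" ∈ ks
        · have cF : (PySem.Set.contains (PySem.Set.ofList ks) "downloadable"
              || PySem.Set.contains (PySem.Set.ofList ks) "download_url") = true := by
            rw [Bool.or_eq_true, hmem, hmem]; exact hf
          have hup : s.1 ≤ 3 := by
            rcases hf with h | h
            · exact (hle 3).mpr (Or.inr ⟨_, h, by decide⟩)
            · exact (hle 3).mpr (Or.inr ⟨_, h, by decide⟩)
          have hs1 : s.1 = 3 := by omega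
          simp only [cD, cP, cVS, cF, if_false, if_true, Bool.false_eq_true, hs1]
          rw [if_pos (by norm_num : (3 : Int) < 5)]
          decide
        · have cF : (PySem.Set.contains (PySem.Set.ofList ks) "downloadable"
              || PySem.Set.contains (PySem.Set.ofList ks) "download_url") = false := by
            rw [Bool.eq_false_iff, Ne, Bool.or_eq_true, hmem, hmem]; exact hf
          have hlo3 : ¬ s.1 ≤ 3 := by
            rw [hle]
            rintro (h5 | ⟨k, hk, hr⟩)
            · omega
            · rcases (dk_rankD_le_iff k).2.2.2.1.mp hr with rfl | rfl | rfl | rfl | rfl | rfl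
              · exact hd hk
              · exact hp hk
              · exact hv (Or.inl hk)
              · exact hv (Or.inr hk)
              · exact hf (Or.inl hk)
              · exact hf (Or.inr hk)
          by_cases htl : "term_label" ∈ ks
          · have cT : PySem.Set.contains (PySem.Set.ofList ks) "term_label" = true := (hmem _).mpr htl
            have hup : s.1 ≤ 4 := (hle 4).mpr (Or.inr ⟨_, htl, by decide⟩)
            have hs1 : s.1 = 4 := by omega
            simp only [cD, cP, cVS, cF, cT, if_false, if_true, Bool.false_eq_true, hs1]
            rw [if_pos (by norm_num : (4 : Int) < 5)]
            decide
          · have cT : PySem.Set.contains (PySem.Set.ofList ks) "term_label" = false := by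
              rw [Bool.eq_false_iff, Ne, hmem]; exact htl
            have hlo4 : ¬ s.1 ≤ 4 := by
              rw [hle]
              rintro (h5 | ⟨k, hk, hr⟩)
              · omega
              · rcases (dk_rankD_le_iff k).2.2.2.2.mp hr with rfl | rfl | rfl | rfl | rfl | rfl | rfl
                · exact hd hk
                · exact hp hk
                · exact hv (Or.inl hk)
                · exact hv (Or.inr hk)
                · exact hf (Or.inl hk)
                · exact hf (Or.inr hk)
                · exact htl hk
            have hup : s.1 ≤ 5 := (hle 5).mpr (Or.inl le_rfl)
            have hs1 : s.1 = 5 := by omega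
            have hkind : s.2.1 = PySem.Set.contains (PySem.Set.ofList ks) "kind" := by
              rw [hs, dk_fold_kind, Bool.false_or, Bool.eq_iff_iff, hmem]
              simp [List.any_eq_true]
            have htime : s.2.2 = PySem.Set.contains (PySem.Set.ofList ks) "time_iso" := by
              rw [hs, dk_fold_time, Bool.false_or, Bool.eq_iff_iff, hmem]
              simp [List.any_eq_true]
            simp only [cD, cP, cVS, cF, cT, if_false, Bool.false_eq_true, hs1, hkind, htime]
            norm_num
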